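-- pv_equiv track=rewrite | github.com/AlishkaL/checkio-mission-bishop-vs-aliens | verification/tests.py | solution
-- ===== SOURCE A (Python) =====
-- def solution(x: int, y: int, w: int, h: int, aliens: list[tuple[int, int]]) -> bool:
--     exits = [(ex, ey) for ex in (0, w - 1) for ey in (0, h - 1)]
--     for dx, dy in [(-1, -1), (-1, 1), (1, -1), (1, 1)]:
--         way = [[x, y]]
--         if 0 <= x + dx < w and 0 <= y + dy < h:
--             mx, my = x, y
--             while True:
--                 mx += dx
--                 my += dy
--                 way.append([mx, my])
--                 if (mx, my) in aliens + [(x, y)]: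
--                     break
--                 if (mx, my) in exits:
--                     return True
--                 if my in (0, h - 1):
--                     dy *= -1
--                 if mx in (0, w - 1):
--                     dx *= -1
--     return False
-- ===== SOURCE B (Python) =====
-- def reflect(a, m):
--     # fold a onto 0..m by billiard reflection (period 2*m)
--     r = a % (2 * m)
--     return r if r <= m else 2 * m - r
--
--
-- def solution(x, y, w, h, aliens):
--     blockers = set(aliens)
--     blockers.add((x, y))
--     exits = {(0, 0), (0, h - 1), (w - 1, 0), (w - 1, h - 1)}
--     for dx, dy in ((-1, -1), (-1, 1), (1, -1), (1, 1)):
--         if 0 <= x + dx < w and 0 <= y + dy < h: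
--             period = 4 * (w - 1) * (h - 1)
--             for t in range(1, period + 1):
--                 cell = (reflect(x + dx * t, w - 1), reflect(y + dy * t, h - 1))
--                 if cell in blockers:
--                     break
--                 if cell in exits:
--                     return True
--     return False
-- ===== Notes on version B (the rewrite author's own statement) =====
-- stated objective: alternative
-- what changed: A mutably simulates the bishop step by step, flipping a direction vector at each wall; B computes the cell visited at time t in closed form by folding x+dx*t and y+dy*t onto the board with a triangular-wave reflection (a % 2(w-1) billiard unfolding) and scans t = 1..period, keeping no position/direction state.
-- outside the precondition, e.g. on solution(1, 1, 3, 1, []): A returns True, B returns False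
import Mathlib
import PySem

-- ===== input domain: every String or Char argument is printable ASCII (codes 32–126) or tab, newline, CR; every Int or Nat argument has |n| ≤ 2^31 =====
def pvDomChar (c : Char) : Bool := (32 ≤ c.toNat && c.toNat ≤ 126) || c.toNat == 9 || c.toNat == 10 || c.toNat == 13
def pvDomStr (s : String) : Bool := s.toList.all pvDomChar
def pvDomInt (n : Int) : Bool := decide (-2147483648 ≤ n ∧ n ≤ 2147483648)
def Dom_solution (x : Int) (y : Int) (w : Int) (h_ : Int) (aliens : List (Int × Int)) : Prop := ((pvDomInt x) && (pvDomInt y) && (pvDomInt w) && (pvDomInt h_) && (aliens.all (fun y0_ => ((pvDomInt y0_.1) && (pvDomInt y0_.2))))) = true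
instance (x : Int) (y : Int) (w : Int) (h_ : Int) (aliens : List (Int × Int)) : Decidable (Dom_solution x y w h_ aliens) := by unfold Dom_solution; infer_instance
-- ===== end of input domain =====

-- B replaces A's mutable-state bounce simulation (position + direction flipped at the walls
-- each step) by the closed-form billiard reflection: the cell visited at time t is computed
-- directly by folding x+dx*t and y+dy*t onto the board with a triangular wave `reflect`,
-- scanned for t = 1..period with no direction state; objective: alternative (same cost class).

-- ===== PORT A =====
-- A's exit-corner list [(ex, ey) for ex in (0, w-1) for ey in (0, h-1)]
def pvExitsA (w h_ : Int) : List (Int × Int) := [(0, 0), (0, h_ - 1), (w - 1, 0), (w - 1, h_ - 1)]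

-- A's `while True` loop, totalised with fuel (Python A diverges only outside Pre_solution;
-- inside Pre_solution the loop provably breaks before the fuel runs out, see pvDirEq below);
-- `way` is A's dead trajectory list, threaded but never read
def pvLoopA (x y w h_ : Int) (aliens : List (Int × Int)) :
    Nat → List (List Int) → Int → Int → Int → Int → Bool
  | 0, _, _, _, _, _ => false
  | Nat.succ f, way, mx, my, dx, dy =>
    let mx' := mx + dx
    let my' := my + dy
    let way' := way ++ [[mx', my']]
    if (aliens ++ [(x, y)]).contains (mx', my') then false
    else if (pvExitsA w h_).contains (mx', my') then true
    else
      let dy' := if my' = 0 ∨ my' = h_ - 1 then -dy else dy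
      let dx' := if mx' = 0 ∨ mx' = w - 1 then -dx else dx
      pvLoopA x y w h_ aliens f way' mx' my' dx' dy'

def solution (x : Int) (y : Int) (w : Int) (h_ : Int) (aliens : List (Int × Int)) : Bool :=
  [((-1 : Int), (-1 : Int)), (-1, 1), (1, -1), (1, 1)].any fun d =>
    if 0 ≤ x + d.1 ∧ x + d.1 < w ∧ 0 ≤ y + d.2 ∧ y + d.2 < h_ then
      pvLoopA x y w h_ aliens (4 * w * h_ + 8).toNat [[x, y]] x y d.1 d.2
    else false

-- ===== PORT B =====
-- Source B's reflect(a, m): fold a onto 0..m by billiard reflection (period 2*m)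
def pvReflect (a m : Int) : Int :=
  let r := PySem.Int.mod a (2 * m)
  if r ≤ m then r else 2 * m - r

def pvBlockersB (x y : Int) (aliens : List (Int × Int)) : PySem.Set (Int × Int) :=
  PySem.Set.add (PySem.Set.ofList aliens) (x, y)

def pvExitsB (w h_ : Int) : PySem.Set (Int × Int) :=
  PySem.Set.ofList [(0, 0), (0, h_ - 1), (w - 1, 0), (w - 1, h_ - 1)]

-- Source B's inner `for t in range(1, period + 1)` loop
def pvScanB (x y w h_ : Int) (aliens : List (Int × Int)) (dx dy : Int) : List Int → Bool
  | [] => false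
  | t :: rest =>
    let cell := (pvReflect (x + dx * t) (w - 1), pvReflect (y + dy * t) (h_ - 1))
    if PySem.Set.contains (pvBlockersB x y aliens) cell then false
    else if PySem.Set.contains (pvExitsB w h_) cell then true
    else pvScanB x y w h_ aliens dx dy rest

def solution_alt (x : Int) (y : Int) (w : Int) (h_ : Int) (aliens : List (Int × Int)) : Bool :=
  [((-1 : Int), (-1 : Int)), (-1, 1), (1, -1), (1, 1)].any fun d =>
    if 0 ≤ x + d.1 ∧ x + d.1 < w ∧ 0 ≤ y + d.2 ∧ y + d.2 < h_ then
      pvScanB x y w h_ aliens d.1 d.2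
        (PySem.List.pyRange 1 (4 * (w - 1) * (h_ - 1) + 1) 1)
    else false

-- ===== PRECONDITION & SPEC =====
-- Pre_ excludes inputs where some first step is legal but the start is off the board or the
-- board is degenerate (w < 2 or h < 2): there A's while loop can run forever, and where it
-- happens to return (e.g. an immediate corner hit on an h = 1 strip) that value is an
-- accident of the non-terminating bounce dynamics, which B's periodic reflection formula
-- does not reproduce.
def Pre_solution (x : Int) (y : Int) (w : Int) (h_ : Int) (aliens : List (Int × Int)) : Prop :=
  (¬ (((0 ≤ x - 1 ∧ x - 1 < w) ∨ (0 ≤ x + 1 ∧ x + 1 < w)) ∧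
      ((0 ≤ y - 1 ∧ y - 1 < h_) ∨ (0 ≤ y + 1 ∧ y + 1 < h_))))
  ∨ (2 ≤ w ∧ 2 ≤ h_ ∧ 0 ≤ x ∧ x < w ∧ 0 ≤ y ∧ y < h_)
instance (x : Int) (y : Int) (w : Int) (h_ : Int) (aliens : List (Int × Int)) : Decidable (Pre_solution x y w h_ aliens) := by unfold Pre_solution; infer_instance

def pvWitness_solution : Int × Int × Int × Int × (List (Int × Int)) := (1, 1, 4, 4, [(2, 2)])

def Spec_solution (x : Int) (y : Int) (w : Int) (h_ : Int) (aliens : List (Int × Int)) (out : Bool) : Prop := out = solution_alt x y w h_ aliens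
instance (x : Int) (y : Int) (w : Int) (h_ : Int) (aliens : List (Int × Int)) (out : Bool) : Decidable (Spec_solution x y w h_ aliens out) := by unfold Spec_solution; infer_instance

-- ===== CLAIM (what is proved, stated in full; the proofs are below) =====
def Claim_equal_solution : Prop := ∀ (x : Int) (y : Int) (w : Int) (h_ : Int) (aliens : List (Int × Int)), Dom_solution x y w h_ aliens → Pre_solution x y w h_ aliens → Spec_solution x y w h_ aliens (solution x y w h_ aliens)

-- ===== LEMMAS AND PROOFS =====

lemma pvEmodSucc (u k : Int) (hk : 0 < k) : (u + 1) % k = if u % k + 1 = k then 0 else u % k + 1 := by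
  have h := Int.mul_ediv_add_emod u k
  have h0 : 0 ≤ u % k := Int.emod_nonneg u (by omega)
  have h1 : u % k < k := Int.emod_lt_of_pos u hk
  have e : u + 1 = (u % k + 1) + k * (u / k) := by omega
  rw [e, Int.add_mul_emod_self_left]
  split_ifs with hc
  · rw [hc, Int.emod_self]
  · exact Int.emod_eq_of_lt (by omega) (by omega)

lemma pvEmodPred (u k : Int) (hk : 0 < k) : (u - 1) % k = if u % k = 0 then k - 1 else u % k - 1 := by
  have h := Int.mul_ediv_add_emod u k
  have h0 : 0 ≤ u % k := Int.emod_nonneg u (by omega)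
  have h1 : u % k < k := Int.emod_lt_of_pos u hk
  split_ifs with hc
  · have e2 : k * (u / k - 1) = k * (u / k) - k := by ring
    have e : u - 1 = (k - 1) + k * (u / k - 1) := by omega
    rw [e, Int.add_mul_emod_self_left]
    exact Int.emod_eq_of_lt (by omega) (by omega)
  · have e : u - 1 = (u % k - 1) + k * (u / k) := by omega
    rw [e, Int.add_mul_emod_self_left]
    exact Int.emod_eq_of_lt (by omega) (by omega)

-- pvReflect is the identity on [0, m]
lemma pvReflect_id (a m : Int) (hm : 1 ≤ m) (h0 : 0 ≤ a) (h1 : a ≤ m) : pvReflect a m = a := by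
  have hk : (0:Int) < 2 * m := by omega
  simp only [pvReflect, PySem.Int.mod_eq_emod_of_pos hk]
  rw [Int.emod_eq_of_lt h0 (by omega)]
  simp [h1]

-- pvReflect is 2m-periodic
lemma pvReflect_period (a m q : Int) (hm : 1 ≤ m) : pvReflect (a + 2 * m * q) m = pvReflect a m := by
  have hk : (0:Int) < 2 * m := by omega
  simp only [pvReflect, PySem.Int.mod_eq_emod_of_pos hk, Int.add_mul_emod_self_left]

-- the reflection law: at an edge the triangular wave turns back, in the interior it continues
lemma pvReflect_step (u m : Int) (hm : 1 ≤ m) :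
    (pvReflect u m = 0 ∨ pvReflect u m = m → pvReflect (u + 1) m = pvReflect (u - 1) m) ∧
    (¬ (pvReflect u m = 0 ∨ pvReflect u m = m) →
      pvReflect (u + 1) m + pvReflect (u - 1) m = 2 * pvReflect u m) := by
  have hk : (0:Int) < 2 * m := by omega
  have h0 : 0 ≤ u % (2 * m) := Int.emod_nonneg u (by omega)
  have h1 : u % (2 * m) < 2 * m := Int.emod_lt_of_pos u hk
  simp only [pvReflect, PySem.Int.mod_eq_emod_of_pos hk, pvEmodSucc u (2 * m) hk,
    pvEmodPred u (2 * m) hk]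
  constructor <;> intro h <;> split_ifs at * <;> omega

-- membership in B's blocker set = membership in A's `aliens + [(x, y)]` list
lemma pvBlockers_eq (x y : Int) (aliens : List (Int × Int)) (c : Int × Int) :
    PySem.Set.contains (pvBlockersB x y aliens) c = (aliens ++ [(x, y)]).contains c := by
  simp only [PySem.Set.contains]
  rw [Bool.eq_iff_iff]
  simp [pvBlockersB, PySem.Set.mem_add, PySem.Set.mem_ofList, List.mem_append]

-- membership in B's exit set = membership in A's exit list
lemma pvExits_eq (w h_ : Int) (c : Int × Int) :
    PySem.Set.contains (pvExitsB w h_) c = (pvExitsA w h_).contains c := by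
  simp only [PySem.Set.contains]
  rw [Bool.eq_iff_iff]
  simp [pvExitsB, pvExitsA, PySem.Set.mem_ofList]

-- one coordinate of one bounce step: A's flipped direction keeps tracking the triangular wave
lemma pvCoordStep (x0 δ m t prev d : Int) (hδ : δ = 1 ∨ δ = -1) (hm : 1 ≤ m)
    (hprev : prev = pvReflect (x0 + δ * t) m)
    (hcur : prev + d = pvReflect (x0 + δ * (t + 1)) m) :
    (prev + d) + (if prev + d = 0 ∨ prev + d = m then -d else d)
      = pvReflect (x0 + δ * (t + 1 + 1)) m := by
  have step := pvReflect_step (x0 + δ * (t + 1)) m hm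
  rcases hδ with h | h <;> subst h
  · have e2 : x0 + 1 * (t + 1 + 1) = (x0 + 1 * (t + 1)) + 1 := by ring
    have e0 : x0 + 1 * t = (x0 + 1 * (t + 1)) - 1 := by ring
    rw [e2]; rw [e0] at hprev
    split_ifs with hedge
    · have h1 := step.1 (by rw [← hcur]; exact hedge)
      omega
    · have h2 := step.2 (by rw [← hcur]; exact hedge)
      omega
  · have e2 : x0 + (-1) * (t + 1 + 1) = (x0 + (-1) * (t + 1)) - 1 := by ring
    have e0 : x0 + (-1) * t = (x0 + (-1) * (t + 1)) + 1 := by ring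
    rw [e2]; rw [e0] at hprev
    split_ifs with hedge
    · have h1 := step.1 (by rw [← hcur]; exact hedge)
      omega
    · have h2 := step.2 (by rw [← hcur]; exact hedge)
      omega

-- main correspondence: A's stateful bounce from time t equals B's closed-form scan over
-- t+1 .. period (also shows A's loop breaks before the fuel runs out inside Pre_)
lemma pvDirEq (x y w h_ : Int) (aliens : List (Int × Int)) (dx0 dy0 : Int)
    (hdx : dx0 = 1 ∨ dx0 = -1) (hdy : dy0 = 1 ∨ dy0 = -1)
    (hw : 2 ≤ w) (hh : 2 ≤ h_)
    (hx0 : 0 ≤ x) (hx1 : x < w) (hy0 : 0 ≤ y) (hy1 : y < h_) :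
    ∀ (f : Nat) (t : Int) (way : List (List Int)) (mx my dx dy : Int),
      0 ≤ t → t < 4 * (w - 1) * (h_ - 1) →
      mx = pvReflect (x + dx0 * t) (w - 1) →
      my = pvReflect (y + dy0 * t) (h_ - 1) →
      mx + dx = pvReflect (x + dx0 * (t + 1)) (w - 1) →
      my + dy = pvReflect (y + dy0 * (t + 1)) (h_ - 1) →
      4 * (w - 1) * (h_ - 1) - t ≤ (f : Int) →
      pvLoopA x y w h_ aliens f way mx my dx dy
        = pvScanB x y w h_ aliens dx0 dy0
            (PySem.List.pyRange (t + 1) (4 * (w - 1) * (h_ - 1) + 1) 1) := by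
  intro f
  induction f with
  | zero =>
    intro t way mx my dx dy ht0 htP hmx hmy hdx2 hdy2 hf
    exfalso; push_cast at hf; omega
  | succ f ih =>
    intro t way mx my dx dy ht0 htP hmx hmy hdx2 hdy2 hf
    have hm : (1:Int) ≤ w - 1 := by omega
    have hn : (1:Int) ≤ h_ - 1 := by omega
    rw [PySem.List.pyRange_one_cons (by omega : t + 1 < 4 * (w - 1) * (h_ - 1) + 1)]
    simp only [pvLoopA, pvScanB, pvBlockers_eq, pvExits_eq, ← hdx2, ← hdy2]
    by_cases hblock : (aliens ++ [(x, y)]).contains (mx + dx, my + dy) = true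
    · rw [if_pos hblock, if_pos hblock]
    rw [if_neg hblock, if_neg hblock]
    by_cases hexit : (pvExitsA w h_).contains (mx + dx, my + dy) = true
    · rw [if_pos hexit, if_pos hexit]
    · rw [if_neg hexit, if_neg hexit]
      have htP1 : t + 1 < 4 * (w - 1) * (h_ - 1) := by
        by_contra hq
        have hteq : t + 1 = 4 * (w - 1) * (h_ - 1) := by omega
        have ex : x + dx0 * (t + 1) = x + 2 * (w - 1) * (2 * (h_ - 1) * dx0) := by
          rw [hteq]; ring
        have ey : y + dy0 * (t + 1) = y + 2 * (h_ - 1) * (2 * (w - 1) * dy0) := by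
          rw [hteq]; ring
        have hxx : mx + dx = x := by
          rw [hdx2, ex, pvReflect_period _ _ _ hm, pvReflect_id _ _ hm hx0 (by omega)]
        have hyy : my + dy = y := by
          rw [hdy2, ey, pvReflect_period _ _ _ hn, pvReflect_id _ _ hn hy0 (by omega)]
        apply hblock
        rw [hxx, hyy]
        simp
      have step := ih (t + 1) (way ++ [[mx + dx, my + dy]]) (mx + dx) (my + dy)
        ((if mx + dx = 0 ∨ mx + dx = w - 1 then -dx else dx))
        ((if my + dy = 0 ∨ my + dy = h_ - 1 then -dy else dy))
        (by omega) htP1 hdx2 hdy2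
        (pvCoordStep x dx0 (w - 1) t mx dx hdx hm hmx hdx2)
        (pvCoordStep y dy0 (h_ - 1) t my dy hdy hn hmy hdy2)
        (by push_cast at hf ⊢; omega)
      exact step

-- one direction of the top-level loop
lemma pvDirTop (x y w h_ : Int) (aliens : List (Int × Int)) (dx0 dy0 : Int)
    (hdx : dx0 = 1 ∨ dx0 = -1) (hdy : dy0 = 1 ∨ dy0 = -1)
    (hpre : Pre_solution x y w h_ aliens) :
    (if 0 ≤ x + dx0 ∧ x + dx0 < w ∧ 0 ≤ y + dy0 ∧ y + dy0 < h_ then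
       pvLoopA x y w h_ aliens (4 * w * h_ + 8).toNat [[x, y]] x y dx0 dy0
     else false)
    = (if 0 ≤ x + dx0 ∧ x + dx0 < w ∧ 0 ≤ y + dy0 ∧ y + dy0 < h_ then
         pvScanB x y w h_ aliens dx0 dy0
           (PySem.List.pyRange 1 (4 * (w - 1) * (h_ - 1) + 1) 1)
       else false) := by
  by_cases hg : 0 ≤ x + dx0 ∧ x + dx0 < w ∧ 0 ≤ y + dy0 ∧ y + dy0 < h_
  · rw [if_pos hg, if_pos hg]
    obtain ⟨hg1, hg2, hg3, hg4⟩ := hg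
    have hnice : 2 ≤ w ∧ 2 ≤ h_ ∧ 0 ≤ x ∧ x < w ∧ 0 ≤ y ∧ y < h_ := by
      rcases hpre with hno | hn
      · exfalso; rcases hdx with h | h <;> rcases hdy with h' | h' <;> subst h <;> subst h' <;> omega
      · exact hn
    obtain ⟨hw, hh, hx0, hx1, hy0, hy1⟩ := hnice
    have hm : (1:Int) ≤ w - 1 := by omega
    have hn : (1:Int) ≤ h_ - 1 := by omega
    have hmx : x = pvReflect (x + dx0 * 0) (w - 1) := by
      rw [show x + dx0 * 0 = x by ring, pvReflect_id x _ hm hx0 (by omega)]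
    have hmy : y = pvReflect (y + dy0 * 0) (h_ - 1) := by
      rw [show y + dy0 * 0 = y by ring, pvReflect_id y _ hn hy0 (by omega)]
    have hdx2 : x + dx0 = pvReflect (x + dx0 * (0 + 1)) (w - 1) := by
      rw [show x + dx0 * (0 + 1) = x + dx0 by ring, pvReflect_id _ _ hm hg1 (by omega)]
    have hdy2 : y + dy0 = pvReflect (y + dy0 * (0 + 1)) (h_ - 1) := by
      rw [show y + dy0 * (0 + 1) = y + dy0 by ring, pvReflect_id _ _ hn hg3 (by omega)]
    have hfuel : 4 * (w - 1) * (h_ - 1) - 0 ≤ (((4 * w * h_ + 8).toNat : Nat) : Int) := by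
      rw [Int.toNat_of_nonneg (by nlinarith)]
      nlinarith
    have := pvDirEq x y w h_ aliens dx0 dy0 hdx hdy hw hh hx0 hx1 hy0 hy1
      ((4 * w * h_ + 8).toNat) 0 [[x, y]] x y dx0 dy0 (by omega)
      (by nlinarith) hmx hmy hdx2 hdy2 hfuel
    simpa using this
  · rw [if_neg hg, if_neg hg]

-- ===== VERDICT (by name: the statement is the Claim_ definition above) =====
theorem solution_spec : Claim_equal_solution := by
  intro x y w h_ aliens _hdom hpre
  unfold Spec_solution
  simp only [solution, solution_alt, List.any_cons, List.any_nil, Bool.or_false]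
  rw [pvDirTop x y w h_ aliens (-1) (-1) (by norm_num) (by norm_num) hpre,
    pvDirTop x y w h_ aliens (-1) 1 (by norm_num) (by norm_num) hpre,
    pvDirTop x y w h_ aliens 1 (-1) (by norm_num) (by norm_num) hpre,
    pvDirTop x y w h_ aliens 1 1 (by norm_num) (by norm_num) hpre]
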